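-- pv_equiv track=rewrite | github.com/kenbockler/Andmeteaduse_masin-ppe_projekt | PROJEKT/K10/S171/2021-11-01-15-25-58/kodu2.py | vall
-- ===== SOURCE A (Python) =====
-- def vall(a, x, y, c, mitu):
--     if mitu == 3:
--         return 1
--     elif y + 1 > 3 or x - 1 < 0:
--         return 0
--     elif a[y + 1][x - 1] != c:
--         return 0
--     else:
--         mitu += 1
--         return vall(a, x - 1, y + 1, c, mitu)
-- ===== SOURCE B (Python) =====
-- def vall(a, x, y, c, mitu):
--     need = 3 - mitu
--     if need < 0:
--         return 0
--     for t in range(need):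
--         ny = y + 1 + t
--         nx = x - 1 - t
--         if ny > 3 or nx < 0 or a[ny][nx] != c:
--             return 0
--     return 1
-- ===== Notes on version B (the rewrite author's own statement) =====
-- stated objective: simpler
-- what changed: Replaces the tail recursion over mutated state (x, y, mitu) by a bounded for-loop over the diagonal offset t with the number of still-needed matches (3 - mitu) computed up front, returning 0 immediately by arithmetic when mitu > 3.
import Mathlib
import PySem

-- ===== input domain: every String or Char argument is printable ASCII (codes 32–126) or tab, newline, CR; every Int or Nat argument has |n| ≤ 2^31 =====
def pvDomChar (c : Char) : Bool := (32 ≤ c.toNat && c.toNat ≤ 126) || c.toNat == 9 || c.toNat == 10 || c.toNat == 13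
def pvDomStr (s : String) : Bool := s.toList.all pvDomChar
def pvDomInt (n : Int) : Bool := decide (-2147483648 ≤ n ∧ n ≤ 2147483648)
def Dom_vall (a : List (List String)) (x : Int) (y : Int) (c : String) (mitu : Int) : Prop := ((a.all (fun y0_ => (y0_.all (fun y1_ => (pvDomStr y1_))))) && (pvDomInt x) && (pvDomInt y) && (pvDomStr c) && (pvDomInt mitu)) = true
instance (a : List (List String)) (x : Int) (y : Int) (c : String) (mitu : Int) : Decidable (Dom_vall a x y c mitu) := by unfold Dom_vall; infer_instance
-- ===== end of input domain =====

-- ===== PORT A =====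
-- B replaces A's tail recursion over mutated (x, y, mitu) by a bounded for-loop over the diagonal offset (objective: simpler).
def vall (a : List (List String)) (x : Int) (y : Int) (c : String) (mitu : Int) : Int :=
  if mitu = 3 then 1
  else if y + 1 > 3 ∨ x - 1 < 0 then 0
  else
    match PySem.List.pyGet? a (y + 1) with
    | none => 0  -- Python raises IndexError here; excluded by Pre_vall
    | some row =>
      match PySem.List.pyGet? row (x - 1) with
      | none => 0  -- IndexError; excluded by Pre_vall
      | some v =>
        if v ≠ c then 0
        else vall a (x - 1) (y + 1) c (mitu + 1)
termination_by (3 - y).toNat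
decreasing_by omega

-- ===== PORT B =====
-- the body of Source B's `for t in range(need)` loop, recursing on the number of remaining iterations
def vall_loop (a : List (List String)) (x : Int) (y : Int) (c : String) : Nat → Int → Int
  | 0, _ => 1
  | k + 1, t =>
    let ny := y + 1 + t
    let nx := x - 1 - t
    if ny > 3 ∨ nx < 0 then 0
    else
      match PySem.List.pyGet? a ny with
      | none => 0  -- IndexError; excluded by Pre_vall
      | some row =>
        match PySem.List.pyGet? row nx with
        | none => 0  -- IndexError; excluded by Pre_vall
        | some v => if v ≠ c then 0 else vall_loop a x y c k (t + 1)

def vall_alt (a : List (List String)) (x : Int) (y : Int) (c : String) (mitu : Int) : Int :=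
  let need := 3 - mitu
  if need < 0 then 0 else vall_loop a x y c need.toNat 0

-- ===== PRECONDITION & SPEC =====
-- the diagonal cell a[y+1+t][x-1-t] under Python indexing (negative indices allowed), none = IndexError
def vallCell (a : List (List String)) (x : Int) (y : Int) (t : Nat) : Option String :=
  match PySem.List.pyGet? a (y + 1 + (t : Int)) with
  | none => none
  | some row => PySem.List.pyGet? row (x - 1 - (t : Int))

-- Pre_vall excludes EXACTLY the inputs on which Python A raises IndexError: it requires every
-- diagonal cell a[y+1+t][x-1-t] that A actually inspects (inside both guards, before the count
-- reaches 3, all earlier diagonal cells equal to c) to exist; A returns a value on all other inputs.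
-- (t is bounded by 2*len(a)+1 because any longer run of successful lookups is impossible.)
def Pre_vall (a : List (List String)) (x : Int) (y : Int) (c : String) (mitu : Int) : Prop :=
  ∀ t < 2 * a.length + 1,
    (y + 1 + (t : Int) ≤ 3 ∧ 0 ≤ x - 1 - (t : Int) ∧ (3 < mitu ∨ mitu + (t : Int) < 3) ∧
      ∀ s < t, vallCell a x y s = some c) →
    (vallCell a x y t).isSome = true
instance (a : List (List String)) (x : Int) (y : Int) (c : String) (mitu : Int) : Decidable (Pre_vall a x y c mitu) := by unfold Pre_vall; infer_instance

def pvWitness_vall : List (List String) × Int × Int × String × Int :=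
  ([["a", "b"], ["c", "d"], ["e", "f"], ["g", "h"]], 1, 0, "c", 2)

def Spec_vall (a : List (List String)) (x : Int) (y : Int) (c : String) (mitu : Int) (out : Int) : Prop := out = vall_alt a x y c mitu
instance (a : List (List String)) (x : Int) (y : Int) (c : String) (mitu : Int) (out : Int) : Decidable (Spec_vall a x y c mitu out) := by unfold Spec_vall; infer_instance

-- ===== CLAIM (what is proved, stated in full; the proofs are below) =====
def Claim_equal_vall : Prop := ∀ (a : List (List String)) (x : Int) (y : Int) (c : String) (mitu : Int), Dom_vall a x y c mitu → Pre_vall a x y c mitu → Spec_vall a x y c mitu (vall a x y c mitu)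

-- ===== LEMMAS AND PROOFS =====

-- shifting the loop offset by one is the same as shifting the start cell
theorem vall_loop_shift (a : List (List String)) (c : String) :
    ∀ (k : Nat) (x y t : Int),
      vall_loop a x y c k (t + 1) = vall_loop a (x - 1) (y + 1) c k t := by
  intro k
  induction k with
  | zero => intro x y t; rfl
  | succ k ih =>
    intro x y t
    simp only [vall_loop]
    have h1 : y + 1 + (t + 1) = (y + 1) + 1 + t := by ring
    have h2 : x - 1 - (t + 1) = (x - 1) - 1 - t := by ring
    rw [h1, h2, ih x y (t + 1)]

-- for mitu = 3 - k (k : Nat), A equals the loop run for k remaining steps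
theorem vall_eq_loop (a : List (List String)) (c : String) :
    ∀ (k : Nat) (x y : Int),
      vall a x y c (3 - (k : Int)) = vall_loop a x y c k 0 := by
  intro k
  induction k with
  | zero => intro x y; simp [vall, vall_loop]
  | succ k ih =>
    intro x y
    have hne : ((3 : Int) - ((k + 1 : Nat) : Int) = 3) = False := by
      simp only [eq_iff_iff, iff_false]; push_cast; omega
    have key : vall a (x - 1) (y + 1) c (3 - ((k + 1 : Nat) : Int) + 1)
        = vall_loop a x y c k (0 + 1) := by
      have harg : (3 : Int) - ((k + 1 : Nat) : Int) + 1 = 3 - (k : Int) := by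
        push_cast; ring
      rw [harg, ih (x - 1) (y + 1), ← vall_loop_shift]
    rw [vall]
    simp only [vall_loop, hne, if_false, add_zero, sub_zero, key]

-- for mitu > 3, A always returns 0 (it steps until a guard fails, never hitting mitu = 3)
theorem vall_gt_three (a : List (List String)) (c : String) :
    ∀ (n : Nat) (x y mitu : Int), (3 - y).toNat ≤ n → 3 < mitu → vall a x y c mitu = 0 := by
  intro n
  induction n with
  | zero =>
    intro x y mitu hn hm
    rw [vall, if_neg (show ¬ mitu = 3 by omega), if_pos (Or.inl (show y + 1 > 3 by omega))]
  | succ n ih =>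
    intro x y mitu hn hm
    rw [vall, if_neg (show ¬ mitu = 3 by omega)]
    by_cases hg : y + 1 > 3 ∨ x - 1 < 0
    · rw [if_pos hg]
    · rw [if_neg hg]
      cases PySem.List.pyGet? a (y + 1) with
      | none => rfl
      | some row =>
        dsimp only
        cases PySem.List.pyGet? row (x - 1) with
        | none => rfl
        | some v =>
          dsimp only
          by_cases hv : v ≠ c
          · rw [if_pos hv]
          · rw [if_neg hv]
            exact ih (x - 1) (y + 1) (mitu + 1) (by omega) (by omega)

-- total equality of the two ports (Pre_vall is not needed for the Lean-level equality;
-- it exists to exclude the inputs on which the Python A raises IndexError)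
theorem vall_eq_alt (a : List (List String)) (x y : Int) (c : String) (mitu : Int) :
    vall a x y c mitu = vall_alt a x y c mitu := by
  unfold vall_alt
  by_cases h : (3 : Int) - mitu < 0
  · simp only [h, if_true]
    exact vall_gt_three a c (3 - y).toNat x y mitu le_rfl (by omega)
  · simp only [h, if_false]
    have hk : (3 : Int) - (((3 - mitu).toNat : Nat) : Int) = mitu := by omega
    have hloop := vall_eq_loop a c (3 - mitu).toNat x y
    rw [hk] at hloop
    exact hloop

-- ===== VERDICT (by name: the statement is the Claim_ definition above) =====
theorem vall_spec : Claim_equal_vall := by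
  intro a x y c mitu _ _
  unfold Spec_vall
  exact vall_eq_alt a x y c mitu
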